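-- pv_equiv track=rewrite | github.com/whimax07/HasheSVG | PyVG/HashFileTriangles.py | __build_triangle_limits
-- ===== SOURCE A (Python) =====
-- def __build_triangle_limits(points: list[int]) -> list[list[int]]:
--     tris = []
--     tri = []
--     for p in points:
--         if len(tri) < 4:
--             tri.append(p)
--             continue
--
--         sum_t = sum(tri)
--         tri.append(sum_t)
--         concat_t = tri[3] << 24 + tri[2] << 16 + tri[1] << 8 + tri[0]
--         tri.append(concat_t)
--         tris.append(tri)
--         tri = []
--
--     return tris
-- ===== SOURCE B (Python) =====
-- def __build_triangle_limits(points: list[int]) -> list[list[int]]: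
--     # Index-driven chunking: each complete group of 5 points yields one row from
--     # its first four values (the 5th point only triggered the flush in the
--     # original and is dropped).  The concat expression keeps the original
--     # operator precedence, written with explicit parentheses.
--     out = []
--     for g in range(len(points) // 5):
--         a, b, c, d = points[5 * g : 5 * g + 4]
--         s = a + b + c + d
--         concat = ((d << (24 + c)) << (16 + b)) << (8 + a)
--         out.append([a, b, c, d, s, concat])
--     return out
-- ===== Notes on version B (the rewrite author's own statement) =====
-- stated objective: simpler
-- what changed: Replaces the stateful accumulate-to-4-then-flush loop (whose 5th element silently triggers and is discarded) with a direct index-driven pass over len(points)//5 groups, slicing the four values of each group and emitting the row in one step.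
import Mathlib
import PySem

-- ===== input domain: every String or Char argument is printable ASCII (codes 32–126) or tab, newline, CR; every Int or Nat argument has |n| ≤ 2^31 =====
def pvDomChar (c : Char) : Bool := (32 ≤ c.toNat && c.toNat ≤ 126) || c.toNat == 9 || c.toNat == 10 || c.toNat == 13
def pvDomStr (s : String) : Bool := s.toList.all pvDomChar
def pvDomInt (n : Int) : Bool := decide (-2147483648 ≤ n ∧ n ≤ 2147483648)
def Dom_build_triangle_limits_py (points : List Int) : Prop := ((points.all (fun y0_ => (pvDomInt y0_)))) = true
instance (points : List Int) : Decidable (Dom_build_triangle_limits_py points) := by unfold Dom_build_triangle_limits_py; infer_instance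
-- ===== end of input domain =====

-- B replaces A's stateful accumulate-4-then-flush loop by an index-driven pass over the
-- len//5 complete groups (objective: simpler); return values agree wherever A returns.


-- ===== PORT A =====
-- A's for-loop over points with the mutable state (tris, tri); the `p` that arrives while
-- tri already has 4 elements is discarded (it only triggers the flush).  Python's `<<`
-- takes a nonnegative shift count (ValueError otherwise, excluded by Pre_), so the
-- shift amount is `.toNat` of the Int expression — exact under Pre_.
def pyShl (x k : Int) : Int := x <<< k.toNat

def buildLoopA : List Int → List Int → List (List Int)
  | _, [] => []
  | tri, p :: ps =>
    if tri.length < 4 then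
      buildLoopA (tri ++ [p]) ps
    else
      let sum_t := tri.sum
      let tri1 := tri ++ [sum_t]
      -- concat_t = tri[3] << 24 + tri[2] << 16 + tri[1] << 8 + tri[0]  (Python precedence)
      let concat_t :=
        pyShl (pyShl (pyShl (PySem.List.pyGetD tri1 3 0) (24 + PySem.List.pyGetD tri1 2 0))
          (16 + PySem.List.pyGetD tri1 1 0)) (8 + PySem.List.pyGetD tri1 0 0)
      (tri1 ++ [concat_t]) :: buildLoopA [] ps

def build_triangle_limits_py (points : List Int) : List (List Int) :=
  buildLoopA [] points

-- ===== PORT B =====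
-- Source B: for g in range(len(points)//5): unpack the 4-element slice, emit the row.
-- The `_ => []` match arm is unreachable (the slice of an in-range group has length 4).
def build_triangle_limits_py_alt (points : List Int) : List (List Int) :=
  (PySem.List.pyRange 0 (PySem.Int.floordiv (points.length : Int) 5) 1).map (fun g =>
    match PySem.List.slice points (some (5 * g)) (some (5 * g + 4)) with
    | [a, b, c, d] =>
        [a, b, c, d, a + b + c + d, pyShl (pyShl (pyShl d (24 + c)) (16 + b)) (8 + a)]
    | _ => [])

-- ===== PRECONDITION & SPEC =====
-- Pre_ excludes exactly the inputs on which Python A raises ValueError ("negative shift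
-- count"): some complete group of 5 has first/second/third value below -8/-16/-24.
def Pre_build_triangle_limits_py (points : List Int) : Prop :=
  ∀ g ∈ List.range (points.length / 5),
    -8 ≤ points.getD (5 * g) 0 ∧ -16 ≤ points.getD (5 * g + 1) 0 ∧
      -24 ≤ points.getD (5 * g + 2) 0
instance (points : List Int) : Decidable (Pre_build_triangle_limits_py points) := by
  unfold Pre_build_triangle_limits_py; infer_instance

def pvWitness_build_triangle_limits_py : List Int := [1, 2, 3, 4, 5, 6]

def Spec_build_triangle_limits_py (points : List Int) (out : List (List Int)) : Prop := out = build_triangle_limits_py_alt points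
instance (points : List Int) (out : List (List Int)) : Decidable (Spec_build_triangle_limits_py points out) := by unfold Spec_build_triangle_limits_py; infer_instance

-- ===== CLAIM (what is proved, stated in full; the proofs are below) =====
def Claim_equal_build_triangle_limits_py : Prop := ∀ (points : List Int), Dom_build_triangle_limits_py points → Pre_build_triangle_limits_py points → Spec_build_triangle_limits_py points (build_triangle_limits_py points)

-- ===== LEMMAS AND PROOFS =====

-- With fewer than 5 elements left (counting those already in tri) no flush ever happens.
lemma buildLoopA_short : ∀ (ps tri : List Int), tri.length + ps.length < 5 →
    buildLoopA tri ps = [] := by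
  intro ps
  induction ps with
  | nil => intro tri _; rfl
  | cons p ps ih =>
    intro tri h
    have hlt : tri.length < 4 := by simp at h; omega
    simp only [buildLoopA, hlt, if_pos]
    exact ih _ (by simp at h ⊢; omega)

-- One full group of five: a row is emitted and the loop restarts on the rest.
lemma buildLoopA_step (a b c d e : Int) (rest : List Int) :
    buildLoopA [] (a :: b :: c :: d :: e :: rest) =
      [a, b, c, d, a + b + c + d,
        pyShl (pyShl (pyShl d (24 + c)) (16 + b)) (8 + a)] :: buildLoopA [] rest := by
  simp [buildLoopA, PySem.List.pyGetD]
  ring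

lemma alt_nil_of_short (points : List Int) (h : points.length < 5) :
    build_triangle_limits_py_alt points = [] := by
  unfold build_triangle_limits_py_alt
  have : PySem.Int.floordiv (points.length : Int) 5 = ((points.length / 5 : Nat) : Int) :=
    PySem.Int.floordiv_natCast _ _
  rw [this, Nat.div_eq_of_lt h]
  simp [PySem.List.pyRange_one_eq_nil]

lemma alt_step (a b c d e : Int) (rest : List Int) :
    build_triangle_limits_py_alt (a :: b :: c :: d :: e :: rest) =
      [a, b, c, d, a + b + c + d,
        pyShl (pyShl (pyShl d (24 + c)) (16 + b)) (8 + a)] ::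
        build_triangle_limits_py_alt rest := by
  unfold build_triangle_limits_py_alt
  have hlen : (a :: b :: c :: d :: e :: rest).length = rest.length + 5 := by simp
  rw [hlen]
  rw [PySem.Int.floordiv_eq_ediv_of_pos (by norm_num : (0:Int) < 5),
      PySem.Int.floordiv_eq_ediv_of_pos (by norm_num : (0:Int) < 5)]
  rw [PySem.List.pyRange_one, PySem.List.pyRange_one]
  have h1 : (((rest.length + 5 : Nat) : Int) / 5 - 0).toNat = rest.length / 5 + 1 := by omega
  have h2 : (((rest.length : Nat) : Int) / 5 - 0).toNat = rest.length / 5 := by omega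
  rw [h1, h2, List.range_succ_eq_map]
  simp only [List.map_cons, List.map_map]
  congr 1
  -- tail: group g+1 of the full list is group g of rest (the head is closed by congr)
  apply List.map_congr_left
  intro k _
  simp only [Function.comp_apply, Nat.succ_eq_add_one]
  -- rewrite the slice bounds into Nat-cast form
  have hb1 : (5 : Int) * (0 + ((k + 1 : Nat) : Int)) = ((5 * k + 5 : Nat) : Int) := by
    push_cast; ring
  have hb2 : ((5 * k + 5 : Nat) : Int) + 4 = ((5 * k + 5 : Nat) : Int) + ((4 : Nat) : Int) := by
    norm_num
  rw [hb1, hb2, PySem.List.slice_natCast_add]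
  have hb3 : (5 : Int) * (0 + (k : Nat)) = ((5 * k : Nat) : Int) := by push_cast; ring
  have hb4 : ((5 * k : Nat) : Int) + 4 = ((5 * k : Nat) : Int) + ((4 : Nat) : Int) := by
    norm_num
  rw [hb3, hb4, PySem.List.slice_natCast_add]
  have hdrop : (a :: b :: c :: d :: e :: rest).drop (5 * k + 5) = rest.drop (5 * k) := by
    rw [show 5 * k + 5 = 5 * k + 1 + 1 + 1 + 1 + 1 by ring]
    simp [List.drop_succ_cons]
  rw [hdrop]

lemma build_eq_alt : ∀ (points : List Int),
    build_triangle_limits_py points = build_triangle_limits_py_alt points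
  | a :: b :: c :: d :: e :: rest => by
    unfold build_triangle_limits_py
    rw [buildLoopA_step, alt_step]
    have := build_eq_alt rest
    unfold build_triangle_limits_py at this
    rw [this]
  | [] => by
    rw [show build_triangle_limits_py [] = [] from rfl, alt_nil_of_short [] (by simp)]
  | [a] => by
    unfold build_triangle_limits_py
    rw [buildLoopA_short _ _ (by simp), alt_nil_of_short _ (by simp)]
  | [a, b] => by
    unfold build_triangle_limits_py
    rw [buildLoopA_short _ _ (by simp), alt_nil_of_short _ (by simp)]
  | [a, b, c] => by
    unfold build_triangle_limits_py
    rw [buildLoopA_short _ _ (by simp), alt_nil_of_short _ (by simp)]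
  | [a, b, c, d] => by
    unfold build_triangle_limits_py
    rw [buildLoopA_short _ _ (by simp), alt_nil_of_short _ (by simp)]

-- ===== VERDICT (by name: the statement is the Claim_ definition above) =====
theorem build_triangle_limits_py_spec : Claim_equal_build_triangle_limits_py := by
  intro points _ _
  unfold Spec_build_triangle_limits_py
  exact build_eq_alt points
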